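-- pv_equiv track=rewrite | github.com/Ag-2O/guriko | guriko.py | WinCount
-- ===== SOURCE A (Python) =====
-- def WinCount(win_sum,winer):
--     for wid in winer:
--         if wid == 0:
--             win_sum[0] += 1
--         elif wid == 1:
--             win_sum[1] += 1
--         else:
--             win_sum[2] += 1
--     return win_sum[0],win_sum[1],win_sum[2]
-- ===== SOURCE B (Python) =====
-- def WinCount(win_sum, winer):
--     # Tabulate first: count the 0s and 1s once, derive the rest arithmetically.
--     c0 = winer.count(0)
--     c1 = winer.count(1)
--     win_sum[0] += c0
--     win_sum[1] += c1
--     win_sum[2] += len(winer) - c0 - c1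
--     return win_sum[0], win_sum[1], win_sum[2]
-- ===== Notes on version B (the rewrite author's own statement) =====
-- stated objective: idiomatic
-- what changed: Replaces the per-element three-way branch with repeated indexed increments by a tabulate-then-arithmetic pass: count the 0s and 1s once with list.count, derive the third bucket as len(winer)-c0-c1, and apply three fixed updates to win_sum.
-- outside the precondition, e.g. on WinCount([0, 0], [0, 1, 5]): A raises IndexError, B raises IndexError
import Mathlib
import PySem

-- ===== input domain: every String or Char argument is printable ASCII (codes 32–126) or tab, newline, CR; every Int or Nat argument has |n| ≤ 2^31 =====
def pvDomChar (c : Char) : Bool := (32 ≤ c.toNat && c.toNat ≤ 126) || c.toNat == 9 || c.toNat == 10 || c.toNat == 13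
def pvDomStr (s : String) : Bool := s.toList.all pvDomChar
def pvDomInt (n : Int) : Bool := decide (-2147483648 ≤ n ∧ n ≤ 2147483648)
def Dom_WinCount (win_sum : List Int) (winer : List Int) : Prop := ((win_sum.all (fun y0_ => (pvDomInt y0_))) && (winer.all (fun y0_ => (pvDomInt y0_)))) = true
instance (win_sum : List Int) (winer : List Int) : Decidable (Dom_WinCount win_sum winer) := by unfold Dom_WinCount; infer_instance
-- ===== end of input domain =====

-- B replaces A's per-element three-way branch with a tabulate-then-arithmetic pass
-- (count the 0s and 1s once, derive the third bucket as len - c0 - c1): idiomatic, same cost.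
-- Both A and B mutate win_sum in place in the same way; the equivalence proved here is about the return value.


-- ===== PORT A =====
-- one loop iteration: the three-way branch incrementing win_sum[0]/[1]/[2]
-- (pySetD/pyGetD are the total forms, exact under Pre_WinCount's in-range guarantee)
def WinCountStep (ws : List Int) (wid : Int) : List Int :=
  if wid == 0 then PySem.List.pySetD ws 0 (PySem.List.pyGetD ws 0 0 + 1)
  else if wid == 1 then PySem.List.pySetD ws 1 (PySem.List.pyGetD ws 1 0 + 1)
  else PySem.List.pySetD ws 2 (PySem.List.pyGetD ws 2 0 + 1)

def WinCount (win_sum : List Int) (winer : List Int) : Int × Int × Int :=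
  let ws := winer.foldl WinCountStep win_sum
  (PySem.List.pyGetD ws 0 0, PySem.List.pyGetD ws 1 0, PySem.List.pyGetD ws 2 0)

-- ===== PORT B =====
def WinCount_alt (win_sum : List Int) (winer : List Int) : Int × Int × Int :=
  let c0 : Int := PySem.List.count winer 0
  let c1 : Int := PySem.List.count winer 1
  (PySem.List.pyGetD win_sum 0 0 + c0,
   PySem.List.pyGetD win_sum 1 0 + c1,
   PySem.List.pyGetD win_sum 2 0 + ((winer.length : Int) - c0 - c1))

-- ===== PRECONDITION & SPEC =====
-- A indexes win_sum[0], win_sum[1], win_sum[2] and raises IndexError when win_sum has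
-- fewer than 3 elements; those inputs are excluded (B raises there too).
def Pre_WinCount (win_sum : List Int) (_winer : List Int) : Prop := 3 ≤ win_sum.length
instance (win_sum : List Int) (winer : List Int) : Decidable (Pre_WinCount win_sum winer) := by unfold Pre_WinCount; infer_instance
def pvWitness_WinCount : List Int × List Int := ([0, 0, 0], [0, 1, 2, 1, 0])

def Spec_WinCount (win_sum : List Int) (winer : List Int) (out : Int × Int × Int) : Prop := out = WinCount_alt win_sum winer
instance (win_sum : List Int) (winer : List Int) (out : Int × Int × Int) : Decidable (Spec_WinCount win_sum winer out) := by unfold Spec_WinCount; infer_instance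

-- ===== CLAIM (what is proved, stated in full; the proofs are below) =====
def Claim_equal_WinCount : Prop := ∀ (win_sum : List Int) (winer : List Int), Dom_WinCount win_sum winer → Pre_WinCount win_sum winer → Spec_WinCount win_sum winer (WinCount win_sum winer)

-- ===== LEMMAS AND PROOFS =====
-- A's loop invariant: folding the step over a list with ≥ 3 cells adds the 0-count to cell 0,
-- the 1-count to cell 1 and the remainder to cell 2, leaving the tail untouched.
lemma winCount_fold (winer : List Int) : ∀ (a b c : Int) (t : List Int),
    winer.foldl WinCountStep (a :: b :: c :: t) =
      (a + (List.count 0 winer : Int)) :: (b + (List.count 1 winer : Int)) ::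
      (c + ((winer.length : Int) - (List.count 0 winer : Int) - (List.count 1 winer : Int))) :: t := by
  induction winer with
  | nil => intro a b c t; simp
  | cons w rest ih =>
    intro a b c t
    simp only [List.foldl_cons, WinCountStep]
    by_cases h0 : w = 0
    · subst h0
      simp [pysem, ih]
      ring
    · by_cases h1 : w = 1
      · subst h1
        simp [pysem, ih]
        constructor <;> ring
      · simp [pysem, ih, h0, h1]
        ring

-- ===== VERDICT (by name: the statement is the Claim_ definition above) =====
theorem WinCount_spec : Claim_equal_WinCount := by
  intro win_sum winer _ hpre
  unfold Pre_WinCount at hpre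
  match win_sum, hpre with
  | a :: b :: c :: t, _ =>
    show WinCount (a :: b :: c :: t) winer = WinCount_alt (a :: b :: c :: t) winer
    simp [WinCount, WinCount_alt, winCount_fold, pysem, PySem.List.count_eq]
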